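-- pv_equiv track=rewrite | github.com/sathvikbhagavan/SAT-Solver | main.py | find_unit_literals
-- ===== SOURCE A (Python) =====
-- def find_unit_literals(cnf, assignment):
--     unit_literals = []
--     for c in cnf:
--         count = 0
--         for l in c:
--             if assignment[abs(l)] != 0:
--                 count += 1
--         if count == len(c)-1:
--             for l in c:
--                 if assignment[abs(l)] == 0:
--                     unit_literals.append(l)
--
--     return unit_literals
-- ===== SOURCE B (Python) =====
-- def _unit_of(clause, assignment):
--     # Short-circuit scan: keep the single unassigned literal seen so far;
--     # abort (no unit) the moment a second unassigned literal appears.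
--     found = None
--     for l in clause:
--         if assignment[abs(l)] == 0:
--             if found is not None:
--                 return None
--             found = l
--     return found
--
--
-- def find_unit_literals(cnf, assignment):
--     unit_literals = []
--     for c in cnf:
--         u = _unit_of(c, assignment)
--         if u is not None:
--             unit_literals.append(u)
--     return unit_literals
-- ===== Notes on version B (the rewrite author's own statement) =====
-- stated objective: alternative
-- what changed: Replaces A's count-then-rescan per clause (count assigned literals, compare with len(c)-1, then rescan to locate the unassigned one) with a short-circuiting single scan per clause maintaining an Option-state candidate: it records the first unassigned literal and aborts as soon as a second one appears, never counting or recomputing lengths.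
import Mathlib
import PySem

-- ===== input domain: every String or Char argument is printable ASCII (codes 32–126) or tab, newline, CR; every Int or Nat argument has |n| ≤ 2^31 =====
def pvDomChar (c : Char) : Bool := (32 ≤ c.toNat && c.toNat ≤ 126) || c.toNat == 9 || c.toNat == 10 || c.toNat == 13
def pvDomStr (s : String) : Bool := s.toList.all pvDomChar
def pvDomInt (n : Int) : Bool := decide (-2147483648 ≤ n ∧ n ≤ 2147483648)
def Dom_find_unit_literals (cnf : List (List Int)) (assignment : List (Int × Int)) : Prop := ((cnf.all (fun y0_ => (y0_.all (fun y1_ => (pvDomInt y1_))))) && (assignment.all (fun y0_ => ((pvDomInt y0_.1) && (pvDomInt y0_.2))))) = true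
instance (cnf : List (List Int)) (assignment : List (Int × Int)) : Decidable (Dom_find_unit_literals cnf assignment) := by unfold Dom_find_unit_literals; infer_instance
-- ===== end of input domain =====

-- B replaces A's count-then-rescan per clause by a short-circuiting Option-state scan
-- that aborts as soon as a second unassigned literal appears (objective: alternative).

-- ===== PORT A =====
-- A's count-and-rescan loops, step for step; assignment[abs(l)] is the dict lookup
-- (Pre_ below guarantees the key is present, so getD never takes its default).
def find_unit_literals (cnf : List (List Int)) (assignment : List (Int × Int)) : List Int :=
  cnf.foldl (fun unit_literals c =>
    let count : Int := c.foldl (fun count l =>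
      if PySem.Dict.getD (PySem.Dict.mk assignment) (|l|) 0 ≠ 0 then count + 1 else count) 0
    if count = (c.length : Int) - 1 then
      c.foldl (fun ul l =>
        if PySem.Dict.getD (PySem.Dict.mk assignment) (|l|) 0 = 0 then ul ++ [l] else ul)
        unit_literals
    else unit_literals) []

-- ===== PORT B =====
-- B's short-circuit helper _unit_of: 'found' is the Option state; an early 'return None'
-- becomes the 'none' answer the moment a second unassigned literal is met.
def pvUnitOf (assignment : List (Int × Int)) : List Int → Option Int → Option Int
  | [], found => found
  | l :: rest, found =>
    if PySem.Dict.getD (PySem.Dict.mk assignment) (|l|) 0 = 0 then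
      match found with
      | some _ => none                      -- early return None in the Python
      | none => pvUnitOf assignment rest (some l)
    else pvUnitOf assignment rest found

def find_unit_literals_alt (cnf : List (List Int)) (assignment : List (Int × Int)) : List Int :=
  cnf.foldl (fun unit_literals c =>
    match pvUnitOf assignment c none with
    | some u => unit_literals ++ [u]
    | none => unit_literals) []

-- ===== PRECONDITION & SPEC =====
-- Pre_ excludes exactly the inputs on which Python A raises KeyError: some literal's
-- variable abs(l) is not a key of assignment.
def Pre_find_unit_literals (cnf : List (List Int)) (assignment : List (Int × Int)) : Prop :=
  (cnf.all (fun c => c.all (fun l => PySem.Dict.contains (PySem.Dict.mk assignment) (|l|)))) = true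
instance (cnf : List (List Int)) (assignment : List (Int × Int)) : Decidable (Pre_find_unit_literals cnf assignment) := by unfold Pre_find_unit_literals; infer_instance

def pvWitness_find_unit_literals : List (List Int) × (List (Int × Int)) :=
  ([[1, -2], [2], [-1, 2, 3]], [(1, 0), (2, -1), (3, 1)])

def Spec_find_unit_literals (cnf : List (List Int)) (assignment : List (Int × Int)) (out : List Int) : Prop := out = find_unit_literals_alt cnf assignment
instance (cnf : List (List Int)) (assignment : List (Int × Int)) (out : List Int) : Decidable (Spec_find_unit_literals cnf assignment out) := by unfold Spec_find_unit_literals; infer_instance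

-- ===== CLAIM (what is proved, stated in full; the proofs are below) =====
def Claim_equal_find_unit_literals : Prop := ∀ (cnf : List (List Int)) (assignment : List (Int × Int)), Dom_find_unit_literals cnf assignment → Pre_find_unit_literals cnf assignment → Spec_find_unit_literals cnf assignment (find_unit_literals cnf assignment)

-- ===== LEMMAS AND PROOFS =====

theorem countP_not_add_countP (c : List Int) (p : Int → Bool) :
    c.countP (fun l => !p l) + c.countP p = c.length := by
  have h := List.length_eq_countP_add_countP (l := c) (p := p)
  simp only [decide_not, Bool.decide_coe] at h
  omega

-- pvUnitOf started with a pending candidate returns it iff no further unassigned literal.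
theorem pvUnitOf_some (assignment : List (Int × Int)) (c : List Int) (f : Int) :
    pvUnitOf assignment c (some f)
      = if c.filter (fun l => decide (PySem.Dict.getD (PySem.Dict.mk assignment) (|l|) 0 = 0)) = []
        then some f else none := by
  induction c with
  | nil => simp [pvUnitOf]
  | cons l rest ih =>
    simp only [pvUnitOf, List.filter_cons]
    by_cases h : PySem.Dict.getD (PySem.Dict.mk assignment) (|l|) 0 = 0
    · simp [h]
    · simp [h, ih]

-- pvUnitOf from the empty state returns the sole unassigned literal, if it is unique.
theorem pvUnitOf_none (assignment : List (Int × Int)) (c : List Int) :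
    pvUnitOf assignment c none
      = match c.filter (fun l => decide (PySem.Dict.getD (PySem.Dict.mk assignment) (|l|) 0 = 0)) with
        | [x] => some x
        | _ => none := by
  induction c with
  | nil => simp [pvUnitOf]
  | cons l rest ih =>
    simp only [pvUnitOf, List.filter_cons]
    by_cases h : PySem.Dict.getD (PySem.Dict.mk assignment) (|l|) 0 = 0
    · simp only [h, decide_true, if_pos, pvUnitOf_some]
      cases he : rest.filter (fun l => decide (PySem.Dict.getD (PySem.Dict.mk assignment) (|l|) 0 = 0)) with
      | nil => simp
      | cons x t => simp
    · simp only [h, decide_false, Bool.false_eq_true, if_false, ih]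

-- One clause step of A equals one clause step of B, for any accumulator.
theorem clause_step_eq (assignment : List (Int × Int)) (c : List Int) (acc : List Int) :
    (let count : Int := c.foldl (fun count l =>
        if PySem.Dict.getD (PySem.Dict.mk assignment) (|l|) 0 ≠ 0 then count + 1 else count) 0
     if count = (c.length : Int) - 1 then
       c.foldl (fun ul l =>
         if PySem.Dict.getD (PySem.Dict.mk assignment) (|l|) 0 = 0 then ul ++ [l] else ul) acc
     else acc)
    =
    (match pvUnitOf assignment c none with
     | some u => acc ++ [u]
     | none => acc) := by
  simp only [PySem.List.foldl_ite_add_one, PySem.List.foldl_append_ite_eq_filter, zero_add,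
    decide_not, pvUnitOf_none]
  have hsum := countP_not_add_countP c
    (fun l => decide (PySem.Dict.getD (PySem.Dict.mk assignment) (|l|) 0 = 0))
  have hlen : (c.filter (fun l => decide (PySem.Dict.getD (PySem.Dict.mk assignment) (|l|) 0 = 0))).length
      = c.countP (fun l => decide (PySem.Dict.getD (PySem.Dict.mk assignment) (|l|) 0 = 0)) :=
    List.countP_eq_length_filter.symm
  rcases he : c.filter (fun l => decide (PySem.Dict.getD (PySem.Dict.mk assignment) (|l|) 0 = 0)) with _ | ⟨x, t⟩
  · have : ¬ ((c.countP (fun l => !decide (PySem.Dict.getD (PySem.Dict.mk assignment) (|l|) 0 = 0)) : Int)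
        = (c.length : Int) - 1) := by rw [he] at hlen; simp at hlen; omega
    simp [this]
  · rcases t with _ | ⟨y, t'⟩
    · have : ((c.countP (fun l => !decide (PySem.Dict.getD (PySem.Dict.mk assignment) (|l|) 0 = 0)) : Int)
          = (c.length : Int) - 1) := by rw [he] at hlen; simp at hlen; omega
      simp [this]
    · have : ¬ ((c.countP (fun l => !decide (PySem.Dict.getD (PySem.Dict.mk assignment) (|l|) 0 = 0)) : Int)
          = (c.length : Int) - 1) := by rw [he] at hlen; simp at hlen; omega
      simp [this]

theorem folds_eq (assignment : List (Int × Int)) (cnf : List (List Int)) (acc : List Int) :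
    cnf.foldl (fun unit_literals c =>
      let count : Int := c.foldl (fun count l =>
        if PySem.Dict.getD (PySem.Dict.mk assignment) (|l|) 0 ≠ 0 then count + 1 else count) 0
      if count = (c.length : Int) - 1 then
        c.foldl (fun ul l =>
          if PySem.Dict.getD (PySem.Dict.mk assignment) (|l|) 0 = 0 then ul ++ [l] else ul)
          unit_literals
      else unit_literals) acc
    =
    cnf.foldl (fun unit_literals c =>
      match pvUnitOf assignment c none with
      | some u => unit_literals ++ [u]
      | none => unit_literals) acc := by
  induction cnf generalizing acc with
  | nil => rfl
  | cons c rest ih =>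
    simp only [List.foldl_cons]
    rw [clause_step_eq]
    exact ih _

-- ===== VERDICT (by name: the statement is the Claim_ definition above) =====
theorem find_unit_literals_spec : Claim_equal_find_unit_literals := by
  intro cnf assignment _ _
  unfold Spec_find_unit_literals find_unit_literals find_unit_literals_alt
  exact folds_eq assignment cnf []
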